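-- pv_equiv track=rewrite | github.com/rikiyanai/asciicker-xpedit | scripts/xp_fidelity_test/recipe_generator.py | _find_horizontal_runs
-- ===== SOURCE A (Python) =====
-- from collections import defaultdict
--
-- def _find_horizontal_runs(coords: list[tuple[int, int]]) -> list[tuple[int, int, int]]:
--     """Find contiguous horizontal runs from (x, y) coordinates.
--
--     Returns list of (x1, x2, y) where x1..x2 is the inclusive column range.
--     """
--     by_row: dict[int, list[int]] = defaultdict(list)
--     for x, y in coords:
--         by_row[y].append(x)
--     runs: list[tuple[int, int, int]] = []
--     for row_y, xs in sorted(by_row.items()):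
--         xs = sorted(xs)
--         start = xs[0]
--         prev = xs[0]
--         for x in xs[1:]:
--             if x == prev + 1:
--                 prev = x
--             else:
--                 runs.append((start, prev, row_y))
--                 start = x
--                 prev = x
--         runs.append((start, prev, row_y))
--     return runs
-- ===== SOURCE B (Python) =====
-- def _find_horizontal_runs(coords: list[tuple[int, int]]) -> list[tuple[int, int, int]]:
--     """Find contiguous horizontal runs from (x, y) coordinates.
--
--     Returns list of (x1, x2, y) where x1..x2 is the inclusive column range.
--     """
--     pts = sorted(coords, key=lambda p: (p[1], p[0]))
--     if not pts:
--         return []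
--     runs: list[tuple[int, int, int]] = []
--     x0, y0 = pts[0]
--     start = prev = x0
--     cur_y = y0
--     for x, y in pts[1:]:
--         if y != cur_y or x != prev + 1:
--             runs.append((start, prev, cur_y))
--             start = prev = x
--             cur_y = y
--         else:
--             prev = x
--     runs.append((start, prev, cur_y))
--     return runs
-- ===== Notes on version B (the rewrite author's own statement) =====
-- stated objective: alternative
-- what changed: Replaced the dict-grouping (bucket per row, re-sort each bucket, per-row inner loop) by a single global sort by (y, x) followed by one linear pass tracking (start, prev, cur_y) that breaks a run on row change or non-adjacent column.
import Mathlib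
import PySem

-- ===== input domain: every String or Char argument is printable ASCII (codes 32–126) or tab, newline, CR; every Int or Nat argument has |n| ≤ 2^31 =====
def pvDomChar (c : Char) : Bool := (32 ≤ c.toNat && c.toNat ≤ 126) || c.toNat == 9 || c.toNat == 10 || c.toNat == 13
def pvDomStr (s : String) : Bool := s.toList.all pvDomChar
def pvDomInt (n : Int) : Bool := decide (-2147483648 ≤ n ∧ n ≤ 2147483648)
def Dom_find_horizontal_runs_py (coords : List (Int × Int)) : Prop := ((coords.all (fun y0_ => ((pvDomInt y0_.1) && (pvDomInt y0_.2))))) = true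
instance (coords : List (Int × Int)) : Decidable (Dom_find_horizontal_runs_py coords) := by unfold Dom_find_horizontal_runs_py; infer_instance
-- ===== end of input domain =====

-- B replaces A's dict-grouping (bucket per row, re-sort each bucket, per-row inner loop) by a single
-- global sort by (y, x) and one linear pass over it (alternative decomposition, same output).

-- ===== PORT A =====
def find_horizontal_runs_py (coords : List (Int × Int)) : List (Int × Int × Int) :=
  let by_row : PySem.Dict Int (List Int) :=
    coords.foldl (fun d p => d.modify p.2 [] (fun xs => xs ++ [p.1])) PySem.Dict.empty
  -- sorted(by_row.items()) compares (key, value) tuples; keys are distinct, so it is a sort by key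
  (PySem.List.sorted by_row.items (fun it => it.1) false).foldl
    (fun runs it =>
      match PySem.List.sorted it.2 (fun x => x) false with
      | [] => runs   -- unreachable: every bucket was created by an append, so xs[0] cannot fail
      | x0 :: rest =>
        let st := rest.foldl
          (fun (st : List (Int × Int × Int) × Int × Int) x =>
            if x = st.2.2 + 1 then (st.1, st.2.1, x)
            else (st.1 ++ [(st.2.1, st.2.2, it.1)], x, x))
          (runs, x0, x0)
        st.1 ++ [(st.2.1, st.2.2, it.1)])
    []

-- ===== PORT B =====
def find_horizontal_runs_py_alt (coords : List (Int × Int)) : List (Int × Int × Int) :=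
  match PySem.List.sorted2 coords (fun p => p.2) (fun p => p.1) false with
  | [] => []
  | q0 :: rest =>
    -- state: (runs, start, prev, cur_y)
    let st := rest.foldl
      (fun (st : List (Int × Int × Int) × Int × Int × Int) (q : Int × Int) =>
        if q.2 ≠ st.2.2.2 ∨ q.1 ≠ st.2.2.1 + 1 then
          (st.1 ++ [(st.2.1, st.2.2.1, st.2.2.2)], q.1, q.1, q.2)
        else (st.1, st.2.1, q.1, st.2.2.2))
      ([], q0.1, q0.1, q0.2)
    st.1 ++ [(st.2.1, st.2.2.1, st.2.2.2)]

-- ===== PRECONDITION & SPEC =====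
def Spec_find_horizontal_runs_py (coords : List (Int × Int)) (out : List (Int × Int × Int)) : Prop := out = find_horizontal_runs_py_alt coords
instance (coords : List (Int × Int)) (out : List (Int × Int × Int)) : Decidable (Spec_find_horizontal_runs_py coords out) := by unfold Spec_find_horizontal_runs_py; infer_instance

-- ===== CLAIM (what is proved, stated in full; the proofs are below) =====
def Claim_equal_find_horizontal_runs_py : Prop := ∀ (coords : List (Int × Int)), Dom_find_horizontal_runs_py coords → Spec_find_horizontal_runs_py coords (find_horizontal_runs_py coords)

-- ===== LEMMAS AND PROOFS =====

-- the run-emitting loop of A on one row (y fixed), as a structural recursion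
def aRun (y s p : Int) : List Int → List (Int × Int × Int)
  | [] => [(s, p, y)]
  | x :: t => if x = p + 1 then aRun y s x t else (s, p, y) :: aRun y x x t

-- the run-emitting loop of B, as a structural recursion
def bRun (cy s p : Int) : List (Int × Int) → List (Int × Int × Int)
  | [] => [(s, p, cy)]
  | q :: t => if q.2 = cy ∧ q.1 = p + 1 then bRun cy s q.1 t else (s, p, cy) :: bRun q.2 q.1 q.1 t

-- the sorted points of one dict row, and the runs A produces for it
def rowPts (r : Int × List Int) : List (Int × Int) :=
  (PySem.List.sorted r.2 (fun x => x) false).map (fun x => (x, r.1))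

def rowRuns (r : Int × List Int) : List (Int × Int × Int) :=
  match PySem.List.sorted r.2 (fun x => x) false with
  | [] => []
  | x0 :: t => aRun r.1 x0 x0 t

-- the dict A builds and the sorted item list it iterates (same terms as in the port)
def dictOf (coords : List (Int × Int)) : PySem.Dict Int (List Int) :=
  coords.foldl (fun d p => d.modify p.2 [] (fun xs => xs ++ [p.1])) PySem.Dict.empty

def rowsOf (coords : List (Int × Int)) : List (Int × List Int) :=
  PySem.List.sorted (dictOf coords).items (fun it => it.1) false

-- Python's tuple key (p[1], p[0]) as a lexicographic key
def klex (p : Int × Int) : Lex (Int × Int) := toLex (p.2, p.1)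

-- A's inner foldl computes aRun
lemma afold (y : Int) (t : List Int) : ∀ (r : List (Int × Int × Int)) (s p : Int),
    (fun st => st.1 ++ [(st.2.1, st.2.2, y)])
      (t.foldl (fun (st : List (Int × Int × Int) × Int × Int) x =>
        if x = st.2.2 + 1 then (st.1, st.2.1, x)
        else (st.1 ++ [(st.2.1, st.2.2, y)], x, x)) (r, s, p))
    = r ++ aRun y s p t := by
  induction t with
  | nil => intro r s p; simp [aRun]
  | cons x t ih =>
    intro r s p
    by_cases h : x = p + 1
    · simpa [aRun, h] using ih r s x
    · simpa [aRun, h, List.append_assoc] using ih (r ++ [(s, p, y)]) x x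

-- B's foldl computes bRun
lemma bfold (t : List (Int × Int)) : ∀ (r : List (Int × Int × Int)) (s p cy : Int),
    (fun st => st.1 ++ [(st.2.1, st.2.2.1, st.2.2.2)])
      (t.foldl (fun (st : List (Int × Int × Int) × Int × Int × Int) (q : Int × Int) =>
        if q.2 ≠ st.2.2.2 ∨ q.1 ≠ st.2.2.1 + 1 then
          (st.1 ++ [(st.2.1, st.2.2.1, st.2.2.2)], q.1, q.1, q.2)
        else (st.1, st.2.1, q.1, st.2.2.2)) (r, s, p, cy))
    = r ++ bRun cy s p t := by
  induction t with
  | nil => intro r s p cy; simp [bRun]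
  | cons q t ih =>
    intro r s p cy
    obtain ⟨qx, qy⟩ := q
    by_cases h1 : qy = cy <;> by_cases h2 : qx = p + 1 <;>
      first
        | simpa [bRun, h1, h2] using ih r s qx cy
        | simpa [bRun, h1, h2, List.append_assoc] using ih (r ++ [(s, p, cy)]) qx qx qy

-- one B pass over a single row equals A's row loop
lemma bRun_map (y : Int) : ∀ (xs : List Int) (s p : Int),
    bRun y s p (xs.map (fun x => (x, y))) = aRun y s p xs := by
  intro xs
  induction xs with
  | nil => intro s p; simp [bRun, aRun]
  | cons x t ih =>
    intro s p
    by_cases h : x = p + 1 <;> simp [bRun, aRun, h, ih]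

-- a row change always flushes the pending run
lemma bRun_map_append (y : Int) (q : Int × Int) (hq : q.2 ≠ y) (t' : List (Int × Int)) :
    ∀ (xs : List Int) (s p : Int),
      bRun y s p (xs.map (fun x => (x, y)) ++ q :: t')
        = aRun y s p xs ++ bRun q.2 q.1 q.1 t' := by
  intro xs
  induction xs with
  | nil => intro s p; simp [bRun, aRun, hq]
  | cons x t ih =>
    intro s p
    by_cases h : x = p + 1 <;> simp [bRun, aRun, h, ih]

lemma mem_rowPts {p : Int × Int} {r : Int × List Int} (h : p ∈ rowPts r) : p.2 = r.1 := by
  simp only [rowPts, List.mem_map] at h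
  obtain ⟨x, _, rfl⟩ := h
  rfl

-- one B pass over the concatenation of strictly y-increasing nonempty rows = per-row A loops
lemma flat_eq : ∀ (L : List (Int × List Int)),
    L.Pairwise (fun a b => a.1 < b.1) → (∀ r ∈ L, r.2 ≠ []) →
    (match L.flatMap rowPts with
     | [] => ([] : List (Int × Int × Int))
     | q :: t => bRun q.2 q.1 q.1 t) = L.flatMap rowRuns := by
  intro L
  induction L with
  | nil => intro _ _; simp
  | cons r L ih =>
    intro hp hne
    have hr2 : r.2 ≠ [] := hne r (by simp)
    obtain ⟨x0, t0, hs⟩ : ∃ x0 t0, PySem.List.sorted r.2 (fun x => x) false = x0 :: t0 := by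
      cases h : PySem.List.sorted r.2 (fun x => x) false with
      | nil => exact absurd ((PySem.List.sorted_eq_nil_iff _ _ _).1 h) hr2
      | cons a b => exact ⟨a, b, rfl⟩
    have hRuns : rowRuns r = aRun r.1 x0 x0 t0 := by simp [rowRuns, hs]
    have hPts : rowPts r = (x0, r.1) :: t0.map (fun x => (x, r.1)) := by simp [rowPts, hs]
    cases L with
    | nil =>
      simp only [List.flatMap_cons, List.flatMap_nil, List.append_nil, hPts, hRuns]
      exact bRun_map r.1 t0 x0 x0
    | cons r' L' =>
      have hr'2 : r'.2 ≠ [] := hne r' (by simp)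
      obtain ⟨x1, t1, hs1⟩ : ∃ x1 t1, PySem.List.sorted r'.2 (fun x => x) false = x1 :: t1 := by
        cases h : PySem.List.sorted r'.2 (fun x => x) false with
        | nil => exact absurd ((PySem.List.sorted_eq_nil_iff _ _ _).1 h) hr'2
        | cons a b => exact ⟨a, b, rfl⟩
      have hPts' : rowPts r' = (x1, r'.1) :: t1.map (fun x => (x, r'.1)) := by simp [rowPts, hs1]
      have hlt : r.1 < r'.1 := (List.pairwise_cons.1 hp).1 r' (by simp)
      have hne' : ((x1, r'.1) : Int × Int).2 ≠ r.1 := by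
        show r'.1 ≠ r.1
        omega
      have ih' := ih (List.pairwise_cons.1 hp).2 (fun a ha => hne a (by simp [ha]))
      have hf2 : (r' :: L').flatMap rowPts
          = (x1, r'.1) :: (t1.map (fun x => (x, r'.1)) ++ L'.flatMap rowPts) := by
        simp [List.flatMap_cons, hPts']
      rw [hf2] at ih'
      have e2 : bRun r'.1 x1 x1 (t1.map (fun x => (x, r'.1)) ++ L'.flatMap rowPts)
          = (r' :: L').flatMap rowRuns := ih'
      have hflat : (r :: r' :: L').flatMap rowPts
          = (x0, r.1) :: (t0.map (fun x => (x, r.1))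
              ++ ((x1, r'.1) :: (t1.map (fun x => (x, r'.1)) ++ L'.flatMap rowPts))) := by
        simp [List.flatMap_cons, hPts, hPts']
      rw [hflat]
      show bRun r.1 x0 x0 (t0.map (fun x => (x, r.1))
          ++ ((x1, r'.1) :: (t1.map (fun x => (x, r'.1)) ++ L'.flatMap rowPts))) = _
      rw [bRun_map_append r.1 (x1, r'.1) hne' _ t0 x0 x0]
      rw [e2]
      simp [List.flatMap_cons, hRuns]

-- characterisation of the dict A builds
lemma dictOf_keys (coords : List (Int × Int)) :
    (dictOf coords).keys = PySem.Set.ofList (coords.map (fun p => p.2)) := by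
  have h := PySem.Dict.keys_foldl_modify_key coords (fun p => p.2) ([] : List Int)
      (fun _ p => (fun xs => xs ++ [p.1])) PySem.Dict.empty
  simpa [dictOf, PySem.Set.update_empty] using h

lemma dictOf_keys_nodup (coords : List (Int × Int)) : (dictOf coords).keys.Nodup := by
  rw [dictOf_keys]; exact PySem.Set.nodup_ofList _

lemma dictOf_getD (coords : List (Int × Int)) (y : Int) :
    (dictOf coords).getD y [] = (coords.filter (fun p => p.2 == y)).map (fun p => p.1) := by
  have h1 : dictOf coords
      = (coords.map (fun p => ((p.2, p.1) : Int × Int))).foldl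
          (fun d q => d.modify q.1 [] (fun xs => xs ++ [q.2])) PySem.Dict.empty := by
    rw [dictOf, List.foldl_map]
  rw [h1, PySem.Dict.getD_foldl_modify_append]
  simp [List.filter_map, List.map_map, Function.comp_def]

lemma dictOf_items (coords : List (Int × Int)) :
    (dictOf coords).items
      = (dictOf coords).keys.map (fun y => (y, (dictOf coords).getD y [])) :=
  PySem.Dict.items_eq_map_keys _ (dictOf_keys_nodup coords) []

-- the per-key filters of a covering nodup key list partition the list
lemma partition_perm : ∀ (ks : List Int) (cs : List (Int × Int)), ks.Nodup →
    (∀ p ∈ cs, p.2 ∈ ks) →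
    (ks.flatMap (fun y => cs.filter (fun p => p.2 == y))).Perm cs := by
  intro ks
  induction ks with
  | nil =>
    intro cs _ h
    cases cs with
    | nil => simp
    | cons c cs => exact absurd (h c (by simp)) (by simp)
  | cons y ks ih =>
    intro cs hnd hcov
    have hsub : ∀ p ∈ cs.filter (fun p => !(p.2 == y)), p.2 ∈ ks := by
      intro p hp
      rw [List.mem_filter] at hp
      have h1 := hcov p hp.1
      have h2 : p.2 ≠ y := by simpa using hp.2
      simp only [List.mem_cons] at h1
      tauto
    have hstep : ∀ y' ∈ ks, cs.filter (fun p => p.2 == y')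
        = (cs.filter (fun p => !(p.2 == y))).filter (fun p => p.2 == y') := by
      intro y' hy'
      have hyne : y ≠ y' := fun h => (List.nodup_cons.1 hnd).1 (h ▸ hy')
      rw [List.filter_filter]
      apply List.filter_congr
      intro p _
      by_cases h : p.2 = y' <;> simp [h, Ne.symm hyne]
    have hcongr : ks.flatMap (fun y' => cs.filter (fun p => p.2 == y'))
        = ks.flatMap (fun y' => (cs.filter (fun p => !(p.2 == y))).filter (fun p => p.2 == y')) :=
      List.flatMap_congr hstep
    rw [List.flatMap_cons, hcongr]
    exact (List.Perm.append_left _ (ih _ (List.nodup_cons.1 hnd).2 hsub)).trans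
      (List.filter_append_perm _ cs)

-- sorted2 with the (y, x) tuple key is sorted with the lexicographic key klex
lemma sorted2_eq_klex (cs : List (Int × Int)) :
    PySem.List.sorted2 cs (fun p => p.2) (fun p => p.1) false
      = PySem.List.sorted cs klex false := by
  have hb : (fun (a b : Int × Int) =>
        decide (a.2 < b.2) || (!decide (b.2 < a.2) && decide (a.1 < b.1)))
      = fun (a b : Int × Int) => decide (klex a < klex b) := by
    funext a b
    by_cases h1 : a.2 < b.2
    · simp [klex, h1, Prod.Lex.lt_iff]
    · by_cases h2 : b.2 < a.2
      · have h3 : ¬(a.2 = b.2) := by omega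
        simp [klex, h1, h2, h3, Prod.Lex.lt_iff]
      · have h3 : a.2 = b.2 := by omega
        by_cases h4 : a.1 < b.1 <;> simp [klex, h3, h4, Prod.Lex.lt_iff]
  show cs.foldl (fun acc x => PySem.List.insertBy
      (fun (a b : Int × Int) =>
        decide (a.2 < b.2) || (!decide (b.2 < a.2) && decide (a.1 < b.1))) x acc) []
    = cs.foldl (fun acc x => PySem.List.insertBy
      (fun (a b : Int × Int) => decide (klex a < klex b)) x acc) []
  rw [hb]

lemma klex_inj : Function.Injective klex := by
  intro a b h
  have h2 : ((a.2, a.1) : Int × Int) = (b.2, b.1) := by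
    have := congrArg ofLex h
    simpa [klex] using this
  exact Prod.ext (congrArg Prod.snd h2) (congrArg Prod.fst h2)

-- the grouped flattening is ≤-sorted under klex
lemma pw_flat : ∀ (L : List (Int × List Int)), L.Pairwise (fun a b => a.1 < b.1) →
    (L.flatMap rowPts).Pairwise (fun a b => klex a ≤ klex b) := by
  intro L
  induction L with
  | nil => intro _; simp
  | cons r L ih =>
    intro hp
    rw [List.flatMap_cons, List.pairwise_append]
    refine ⟨?_, ih (List.pairwise_cons.1 hp).2, ?_⟩
    · rw [rowPts, List.pairwise_map]
      exact (PySem.List.sorted_pairwise r.2 (fun x => x)).imp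
        (fun {a b} h => by simp only [klex, Prod.Lex.le_iff, ofLex_toLex]; exact Or.inr ⟨by simp, h⟩)
    · intro a ha b hb
      obtain ⟨r', hr', hbr'⟩ := List.mem_flatMap.1 hb
      have h1 : a.2 = r.1 := mem_rowPts ha
      have h2 : b.2 = r'.1 := mem_rowPts hbr'
      have h3 : r.1 < r'.1 := (List.pairwise_cons.1 hp).1 r' hr'
      simp only [klex, Prod.Lex.le_iff, ofLex_toLex]
      omega

-- the grouped flattening is a permutation of the input
lemma flat_perm (coords : List (Int × Int)) :
    ((rowsOf coords).flatMap rowPts).Perm coords := by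
  have e1 : ((rowsOf coords).flatMap rowPts).Perm ((dictOf coords).items.flatMap rowPts) :=
    List.Perm.flatMap (PySem.List.sorted_perm _ _ _) (fun a _ => List.Perm.refl _)
  have e2 : (dictOf coords).items.flatMap rowPts
      = (dictOf coords).keys.flatMap (fun y => rowPts (y, (dictOf coords).getD y [])) := by
    rw [dictOf_items coords]
    exact List.flatMap_map _ _ _
  have e3 : ∀ y ∈ (dictOf coords).keys,
      (rowPts (y, (dictOf coords).getD y [])).Perm (coords.filter (fun p => p.2 == y)) := by
    intro y _
    have p1 : (rowPts (y, (dictOf coords).getD y [])).Perm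
        (((dictOf coords).getD y []).map (fun x => (x, y))) :=
      List.Perm.map _ (PySem.List.sorted_perm _ _ _)
    have p2 : ((dictOf coords).getD y []).map (fun x => (x, y))
        = coords.filter (fun p => p.2 == y) := by
      rw [dictOf_getD, List.map_map]
      have hc : ∀ p ∈ coords.filter (fun p => p.2 == y),
          ((fun x => (x, y)) ∘ (fun p : Int × Int => p.1)) p = id p := by
        intro p hp
        have hpy : p.2 = y := by simpa using (List.mem_filter.1 hp).2
        simp [← hpy]
      rw [List.map_congr_left hc, List.map_id]
    exact p1.trans (p2 ▸ List.Perm.refl _)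
  have e4 : ((dictOf coords).keys.flatMap (fun y => coords.filter (fun p => p.2 == y))).Perm coords := by
    apply partition_perm _ _ (dictOf_keys_nodup coords)
    intro p hp
    rw [dictOf_keys, PySem.Set.mem_ofList]
    exact List.mem_map_of_mem hp
  have e5 : ((dictOf coords).keys.flatMap (fun y => rowPts (y, (dictOf coords).getD y []))).Perm
      ((dictOf coords).keys.flatMap (fun y => coords.filter (fun p => p.2 == y))) :=
    List.Perm.flatMap (List.Perm.refl _) e3
  exact e1.trans (e2 ▸ (e5.trans e4))

-- rows are strictly increasing in y
lemma rows_pairwise_lt (coords : List (Int × Int)) :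
    (rowsOf coords).Pairwise (fun a b => a.1 < b.1) := by
  have hperm : (rowsOf coords).Perm (dictOf coords).items := PySem.List.sorted_perm _ _ _
  have hle : (rowsOf coords).Pairwise (fun a b => a.1 ≤ b.1) :=
    PySem.List.sorted_pairwise _ _
  have hfst : ((rowsOf coords).map (fun it => it.1)).Nodup := by
    have hp2 : ((rowsOf coords).map (fun it => it.1)).Perm (dictOf coords).keys := by
      have := List.Perm.map (fun it : Int × List Int => it.1) hperm
      simpa [PySem.Dict.keys] using this
    exact hp2.nodup_iff.2 (dictOf_keys_nodup coords)
  have hne : (rowsOf coords).Pairwise (fun a b => a.1 ≠ b.1) := List.pairwise_map.mp hfst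
  exact (hle.and hne).imp (fun h => lt_of_le_of_ne h.1 h.2)

-- every row bucket is nonempty
lemma rows_ne (coords : List (Int × Int)) : ∀ r ∈ rowsOf coords, r.2 ≠ [] := by
  intro r hr
  have hr' : r ∈ (dictOf coords).items := (PySem.List.sorted_perm _ _ _).mem_iff.1 hr
  rw [dictOf_items coords] at hr'
  obtain ⟨y, hy, rfl⟩ := List.mem_map.1 hr'
  rw [dictOf_keys, PySem.Set.mem_ofList] at hy
  obtain ⟨p, hp, rfl⟩ := List.mem_map.1 hy
  simp only [dictOf_getD]
  intro hcon
  rw [List.map_eq_nil_iff] at hcon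
  have hmem : p ∈ coords.filter (fun q => q.2 == p.2) := List.mem_filter.2 ⟨hp, by simp⟩
  simp [hcon] at hmem

-- the sort by (y, x) IS the grouped flattening
lemma sorted_eq_flat (coords : List (Int × Int)) :
    PySem.List.sorted coords klex false = (rowsOf coords).flatMap rowPts := by
  apply PySem.List.eq_of_perm_of_pairwise_le_of_injective klex klex_inj
  · exact (PySem.List.sorted_perm _ _ _).trans (flat_perm coords).symm
  · exact PySem.List.sorted_pairwise _ _
  · exact pw_flat _ (rows_pairwise_lt coords)

-- port A equals the per-row decomposition
lemma portA_eq (coords : List (Int × Int)) :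
    find_horizontal_runs_py coords = (rowsOf coords).flatMap rowRuns := by
  have h1 : find_horizontal_runs_py coords
      = (rowsOf coords).foldl (fun runs it => runs ++ rowRuns it) [] := by
    apply PySem.List.foldl_congr_mem
    intro acc it _
    cases hs : PySem.List.sorted it.2 (fun x => x) false with
    | nil => simp [rowRuns, hs]
    | cons x0 t0 => simpa [rowRuns, hs] using afold it.1 t0 acc x0 x0
  rw [h1, PySem.List.foldl_append_eq_flatMap, List.nil_append]

-- port B equals one bRun pass over the sorted points
lemma portB_eq (cs : List (Int × Int)) :
    find_horizontal_runs_py_alt cs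
      = (match PySem.List.sorted2 cs (fun p => p.2) (fun p => p.1) false with
         | [] => ([] : List (Int × Int × Int))
         | q :: t => bRun q.2 q.1 q.1 t) := by
  unfold find_horizontal_runs_py_alt
  cases hs : PySem.List.sorted2 cs (fun p => p.2) (fun p => p.1) false with
  | nil => simp
  | cons q t => simpa using bfold t [] q.1 q.1 q.2

-- ===== VERDICT (by name: the statement is the Claim_ definition above) =====
theorem find_horizontal_runs_py_spec : Claim_equal_find_horizontal_runs_py := by
  unfold Claim_equal_find_horizontal_runs_py
  intro coords _
  unfold Spec_find_horizontal_runs_py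
  rw [portA_eq, portB_eq, sorted2_eq_klex, sorted_eq_flat]
  exact (flat_eq _ (rows_pairwise_lt coords) (rows_ne coords)).symm
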